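-- pv_equiv track=rewrite | github.com/vparrello/FIG-Bioinformatics-Course | 2_Hammers/2.1_Hammers-as-Genetic-Barcodes/Solutions/hammer_creator_solution.py | find_hammers
-- ===== SOURCE A (Python) =====
-- from collections import defaultdict
--
-- def find_hammers(genome_sequences, k):
--     kmer_counts = defaultdict(int)
--     kmer_genomes = defaultdict(set)
--
--     for genome_id, sequence in genome_sequences:
--         for i in range(len(sequence) - k + 1):
--             kmer = sequence[i:i+k]
--             kmer_counts[kmer] += 1
--             kmer_genomes[kmer].add(genome_id)
--
--     hammers = [(kmer, list(genome_ids)[0]) for kmer, genome_ids in kmer_genomes.items() if kmer_counts[kmer] == 1 and len(genome_ids) == 1]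
--
--     return hammers
-- ===== SOURCE B (Python) =====
-- def find_hammers(genome_sequences, k):
--     # Stage 1: flatten into the stream of (kmer, genome_id) events in encounter order.
--     events = [(seq[i:i+k], gid) for gid, seq in genome_sequences
--                                 for i in range(len(seq) - k + 1)]
--     # Stage 2: sort the k-mers and collect those whose run has length 1
--     # (a k-mer occurs once overall iff its run in the sorted list has length 1;
--     #  such a k-mer necessarily comes from a single genome).
--     srt = sorted(km for km, _ in events)
--     unique = set()
--     prev = None
--     run = 0
--     for km in srt:
--         if km == prev:
--             run += 1
--         else:
--             if run == 1:
--                 unique.add(prev)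
--             prev = km
--             run = 1
--     if run == 1:
--         unique.add(prev)
--     # Stage 3: keep the events whose k-mer is globally unique; since each such
--     # k-mer occurs exactly once, this is A's first-encounter order.
--     return [(km, gid) for km, gid in events if km in unique]
-- ===== Notes on version B (the rewrite author's own statement) =====
-- stated objective: alternative
-- what changed: Replaces A's one-pass dict-of-counts plus dict-of-genome-sets aggregation with a staged sort-based algorithm: flatten to an event list, sort the k-mers, detect globally-unique k-mers by a run-length scan over the sorted list, then filter the event list by that set.
import Mathlib
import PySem

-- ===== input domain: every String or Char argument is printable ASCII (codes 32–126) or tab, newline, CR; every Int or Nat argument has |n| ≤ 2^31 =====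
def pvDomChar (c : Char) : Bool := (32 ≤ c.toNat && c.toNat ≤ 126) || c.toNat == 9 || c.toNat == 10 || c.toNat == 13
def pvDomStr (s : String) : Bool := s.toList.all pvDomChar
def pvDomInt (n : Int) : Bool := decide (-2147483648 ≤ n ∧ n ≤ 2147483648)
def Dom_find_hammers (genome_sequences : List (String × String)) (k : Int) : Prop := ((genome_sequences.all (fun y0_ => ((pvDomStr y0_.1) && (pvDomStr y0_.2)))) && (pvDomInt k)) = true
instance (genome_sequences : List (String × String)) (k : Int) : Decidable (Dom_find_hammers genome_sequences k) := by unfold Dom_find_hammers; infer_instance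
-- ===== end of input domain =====

-- B replaces A's single-pass dict-of-counts + dict-of-genome-id-sets aggregation with a staged
-- sort-based algorithm: flatten to an event list, sort the k-mers, mark run-length-1 k-mers as
-- unique, then filter the event list (alternative algorithm, same results).

-- ===== PORT A =====
-- list(genome_ids)[0] is ported as pyGet? 0 with getD "": it is only evaluated under the
-- guard len(genome_ids) == 1, where the set is a singleton (default never used, order determined).
def find_hammers (genome_sequences : List (String × String)) (k : Int) : List (String × String) :=
  let st := genome_sequences.foldl
    (fun (st : PySem.Dict String Int × PySem.Dict String (PySem.Set String)) g =>
      (PySem.List.pyRange 0 (PySem.Str.len g.2 - k + 1) 1).foldl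
        (fun st i =>
          let kmer := PySem.Str.slice g.2 (some i) (some (i + k))
          (st.1.modify kmer 0 (· + 1), st.2.modify kmer PySem.Set.empty (fun s => s.add g.1)))
        st)
    (PySem.Dict.empty, PySem.Dict.empty)
  (st.2.items.filter (fun p => st.1.getD p.1 0 == 1 && PySem.Set.len p.2 == 1)).map
    (fun p => (p.1, (PySem.List.pyGet? p.2 0).getD ""))

-- ===== PORT B =====
-- B-side helpers: the event-list comprehension, the loop body of the run scan, and the
-- post-loop flush ('if run == 1: unique.add(prev)').
def pvEvents (genome_sequences : List (String × String)) (k : Int) : List (String × String) :=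
  genome_sequences.flatMap (fun g =>
    (PySem.List.pyRange 0 (PySem.Str.len g.2 - k + 1) 1).map
      (fun i => (PySem.Str.slice g.2 (some i) (some (i + k)), g.1)))

-- Python's 'km == prev' with prev: Optional[str] is 'st.2.1 == some km' (a str never equals None).
def pvScanStep (st : PySem.Set String × Option String × Int) (km : String) :
    PySem.Set String × Option String × Int :=
  if st.2.1 == some km then (st.1, st.2.1, st.2.2 + 1)
  else ((if st.2.2 == 1 then (match st.2.1 with
                              | some p => PySem.Set.add st.1 p
                              | none => st.1) else st.1), some km, 1)

def pvFlush (st : PySem.Set String × Option String × Int) : PySem.Set String :=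
  if st.2.2 == 1 then (match st.2.1 with
                       | some p => PySem.Set.add st.1 p
                       | none => st.1) else st.1

-- Python's library call sorted(...) (no key) is ported as Lean's stable List.mergeSort on ≤.
def find_hammers_alt (genome_sequences : List (String × String)) (k : Int) : List (String × String) :=
  let events := pvEvents genome_sequences k
  let srt := (events.map Prod.fst).mergeSort (fun a b => a ≤ b)
  let unique := pvFlush (srt.foldl pvScanStep (PySem.Set.empty, none, 0))
  events.filter (fun e => PySem.Set.contains unique e.1)

-- ===== PRECONDITION & SPEC =====
def Spec_find_hammers (genome_sequences : List (String × String)) (k : Int) (out : List (String × String)) : Prop := out = find_hammers_alt genome_sequences k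
instance (genome_sequences : List (String × String)) (k : Int) (out : List (String × String)) : Decidable (Spec_find_hammers genome_sequences k out) := by unfold Spec_find_hammers; infer_instance

-- ===== CLAIM (what is proved, stated in full; the proofs are below) =====
def Claim_equal_find_hammers : Prop := ∀ (genome_sequences : List (String × String)) (k : Int), Dom_find_hammers genome_sequences k → Spec_find_hammers genome_sequences k (find_hammers genome_sequences k)

-- ===== LEMMAS AND PROOFS =====

-- A's per-event step, and the first-occurrence-dict / duplicate-set intermediate used
-- only by the proof to bridge A's aggregation to global k-mer counts.
def pvStepA (st : PySem.Dict String Int × PySem.Dict String (PySem.Set String))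
    (e : String × String) : PySem.Dict String Int × PySem.Dict String (PySem.Set String) :=
  (st.1.modify e.1 0 (· + 1), st.2.modify e.1 PySem.Set.empty (fun s => s.add e.2))

def pvStepO (st : PySem.Dict String String × PySem.Set String)
    (e : String × String) : PySem.Dict String String × PySem.Set String :=
  if st.1.contains e.1 then (st.1, st.2.add e.1)
  else (st.1.insert e.1 e.2, st.2)

theorem pvStepO_pos (st : PySem.Dict String String × PySem.Set String) (e : String × String)
    (h : st.1.contains e.1 = true) : pvStepO st e = (st.1, st.2.add e.1) := by
  unfold pvStepO; rw [if_pos h]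

theorem pvStepO_neg (st : PySem.Dict String String × PySem.Set String) (e : String × String)
    (h : st.1.contains e.1 = false) : pvStepO st e = (st.1.insert e.1 e.2, st.2) := by
  unfold pvStepO; rw [h]; simp

-- the invariant relating A's state to the intermediate state
def pvInv (a : PySem.Dict String Int × PySem.Dict String (PySem.Set String))
    (b : PySem.Dict String String × PySem.Set String) : Prop :=
  List.Forall₂ (fun (p : String × PySem.Set String) (q : String × String) => p.1 = q.1 ∧
      ((a.1.getD p.1 0 = 1 ∧ p.2 = [q.2] ∧ b.2.contains p.1 = false) ∨
       (2 ≤ a.1.getD p.1 0 ∧ b.2.contains p.1 = true)))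
    a.2.items b.1.items
  ∧ ∀ km, a.2.contains km = false → (a.1.getD km 0 = 0 ∧ b.1.contains km = false ∧ b.2.contains km = false)

theorem pvInv_init : pvInv (PySem.Dict.empty, PySem.Dict.empty) (PySem.Dict.empty, PySem.Set.empty) := by
  constructor
  · exact List.Forall₂.nil
  · intro km _
    refine ⟨rfl, rfl, rfl⟩

theorem pv_forall2_imp_mem {α β : Type} {R S : α → β → Prop} {l₁ : List α} {l₂ : List β}
    (h : ∀ a b, a ∈ l₁ → R a b → S a b) (hf : List.Forall₂ R l₁ l₂) : List.Forall₂ S l₁ l₂ := by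
  induction hf with
  | nil => exact List.Forall₂.nil
  | cons hab t ih =>
    exact List.Forall₂.cons (h _ _ List.mem_cons_self hab)
      (ih (fun a b ha => h a b (List.mem_cons_of_mem _ ha)))

theorem pv_forall2_append_singleton {α β : Type} {R : α → β → Prop} {l₁ : List α} {l₂ : List β}
    (hf : List.Forall₂ R l₁ l₂) {a : α} {b : β} (hab : R a b) :
    List.Forall₂ R (l₁ ++ [a]) (l₂ ++ [b]) := by
  induction hf with
  | nil => exact List.Forall₂.cons hab List.Forall₂.nil
  | cons h t ih => exact List.Forall₂.cons h ih

theorem pv_contains_add (s : PySem.Set String) (x y : String) :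
    (PySem.Set.add s x).contains y = (s.contains y || y == x) := by
  have hbd : (y == x) = decide (y = x) := by
    by_cases hyx : y = x <;> simp [hyx]
  unfold PySem.Set.add
  split_ifs with h
  · by_cases hyx : y = x
    · subst hyx
      rw [h]
      simp
    · have hbe : (y == x) = false := by simp [hyx]
      rw [hbe, Bool.or_false]
  · unfold PySem.Set.contains
    simp [hbd]

theorem pv_any_eq {α β γ : Type} [BEq γ] {R : γ × α → γ × β → Prop}
    {l₁ : List (γ × α)} {l₂ : List (γ × β)}
    (hR : ∀ p q, R p q → p.1 = q.1) (hf : List.Forall₂ R l₁ l₂) (x : γ) :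
    l₁.any (fun p => p.1 == x) = l₂.any (fun p => p.1 == x) := by
  induction hf with
  | nil => rfl
  | cons hpq t ih => simp only [List.any_cons, hR _ _ hpq, ih]

theorem pvInv_step (a : PySem.Dict String Int × PySem.Dict String (PySem.Set String))
    (b : PySem.Dict String String × PySem.Set String) (e : String × String)
    (h : pvInv a b) : pvInv (pvStepA a e) (pvStepO b e) := by
  obtain ⟨hf, hout⟩ := h
  have hcont : ∀ x, a.2.contains x = b.1.contains x :=
    fun x => pv_any_eq (fun p q hpq => hpq.1) hf x
  by_cases hmem : a.2.contains e.1 = true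
  · -- e.1 already present: A bumps the count and the genome set; O records a duplicate
    have hmemb : b.1.contains e.1 = true := by rw [← hcont]; exact hmem
    unfold pvInv pvStepA pvStepO
    rw [hmemb, if_pos rfl]
    dsimp only
    simp only [PySem.Dict.modify]
    constructor
    · rw [PySem.Dict.items_insert_of_contains _ _ hmem]
      refine List.forall₂_map_left_iff.mpr (hf.imp ?_)
      intro p q hpq
      obtain ⟨hk, hbr⟩ := hpq
      by_cases hpk : p.1 = e.1
      · have hbeq : (p.1 == e.1) = true := beq_iff_eq.mpr hpk
        rw [if_pos hbeq]
        dsimp only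
        refine ⟨by rw [← hpk]; exact hk, Or.inr ⟨?_, ?_⟩⟩
        · rw [PySem.Dict.getD_insert, if_pos rfl]
          rw [hpk] at hbr
          rcases hbr with ⟨h1, _, _⟩ | ⟨h1, _⟩ <;> omega
        · rw [pv_contains_add]
          simp
      · have hbeq : (p.1 == e.1) = false := by simp [hpk]
        rw [if_neg (by simp [hbeq])]
        refine ⟨hk, ?_⟩
        have hc : (a.1.insert e.1 (a.1.getD e.1 0 + 1)).getD p.1 0 = a.1.getD p.1 0 := by
          rw [PySem.Dict.getD_insert, if_neg hpk]
        have hd : (PySem.Set.add b.2 e.1).contains p.1 = b.2.contains p.1 := by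
          rw [pv_contains_add, hbeq, Bool.or_false]
        rw [hc, hd]
        exact hbr
    · intro km hkm
      rw [PySem.Dict.contains_insert, Bool.or_eq_false_iff] at hkm
      obtain ⟨hk1, hk2⟩ := hkm
      obtain ⟨hc0, hb1, hb2⟩ := hout km hk2
      refine ⟨?_, hb1, ?_⟩
      · rw [PySem.Dict.getD_insert, if_neg (by simpa using hk1)]
        exact hc0
      · rw [pv_contains_add, hk1, Bool.or_false]
        exact hb2
  · -- e.1 is new: A appends a fresh count-1 entry and singleton set; O records the first genome
    have hmem' : a.2.contains e.1 = false := by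
      cases hx : a.2.contains e.1
      · rfl
      · exact absurd hx hmem
    have hmemb : b.1.contains e.1 = false := by rw [← hcont]; exact hmem'
    unfold pvInv pvStepA pvStepO
    rw [hmemb, if_neg (by simp)]
    dsimp only
    simp only [PySem.Dict.modify]
    have hnotin : ∀ p ∈ a.2.items, (p.1 == e.1) = false := by
      intro p hp
      have hx := hmem'
      unfold PySem.Dict.contains at hx
      rw [List.any_eq_false] at hx
      exact Bool.eq_false_iff.mpr (hx p hp)
    constructor
    · rw [PySem.Dict.getD_of_not_contains _ _ hmem',
        PySem.Dict.items_insert_of_not_contains _ _ hmem',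
        PySem.Dict.items_insert_of_not_contains _ _ hmemb]
      refine pv_forall2_append_singleton ?_ ?_
      · refine pv_forall2_imp_mem ?_ hf
        intro p q hp hpq
        obtain ⟨hk, hbr⟩ := hpq
        have hpk : p.1 ≠ e.1 := by simpa using hnotin p hp
        refine ⟨hk, ?_⟩
        have hc : (a.1.insert e.1 (a.1.getD e.1 0 + 1)).getD p.1 0 = a.1.getD p.1 0 := by
          rw [PySem.Dict.getD_insert, if_neg hpk]
        rw [hc]
        exact hbr
      · refine ⟨rfl, Or.inl ⟨?_, ?_, ?_⟩⟩
        · rw [PySem.Dict.getD_insert, if_pos rfl]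
          have h0 : a.1.getD e.1 0 = 0 := (hout e.1 hmem').1
          omega
        · rfl
        · exact (hout e.1 hmem').2.2
    · intro km hkm
      rw [PySem.Dict.contains_insert, Bool.or_eq_false_iff] at hkm
      obtain ⟨hk1, hk2⟩ := hkm
      obtain ⟨hc0, hb1, hb2⟩ := hout km hk2
      refine ⟨?_, ?_, hb2⟩
      · rw [PySem.Dict.getD_insert, if_neg (by simpa using hk1)]
        exact hc0
      · rw [PySem.Dict.contains_insert, hk1, Bool.false_or]
        exact hb1

theorem pvInv_fold (l : List (String × String))
    (a : PySem.Dict String Int × PySem.Dict String (PySem.Set String))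
    (b : PySem.Dict String String × PySem.Set String)
    (h : pvInv a b) : pvInv (l.foldl pvStepA a) (l.foldl pvStepO b) := by
  induction l generalizing a b with
  | nil => exact h
  | cons e t ih => exact ih _ _ (pvInv_step a b e h)

theorem pvInv_out_aux (ca : PySem.Dict String Int) (db : PySem.Set String)
    (l₁ : List (String × PySem.Set String)) (l₂ : List (String × String))
    (hf : List.Forall₂ (fun (p : String × PySem.Set String) (q : String × String) => p.1 = q.1 ∧
      ((ca.getD p.1 0 = 1 ∧ p.2 = [q.2] ∧ db.contains p.1 = false) ∨
       (2 ≤ ca.getD p.1 0 ∧ db.contains p.1 = true))) l₁ l₂) :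
    (l₁.filter (fun p => ca.getD p.1 0 == 1 && PySem.Set.len p.2 == 1)).map
      (fun p => (p.1, (PySem.List.pyGet? p.2 0).getD ""))
    = l₂.filter (fun p => !(db.contains p.1)) := by
  induction hf with
  | nil => rfl
  | @cons p q t₁ t₂ hpq ht ih =>
    obtain ⟨hk, hbr⟩ := hpq
    rcases hbr with ⟨h1, h2, h3⟩ | ⟨h1, h2⟩
    · have hc : (ca.getD p.1 0 == 1 && PySem.Set.len p.2 == 1) = true := by
        rw [h1, h2]; rfl
      have hcb : (!db.contains q.1) = true := by rw [← hk]; rw [h3]; rfl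
      simp only [List.filter_cons]
      rw [hc, hcb, if_pos rfl, if_pos rfl, List.map_cons, ih, h2]
      simp only [PySem.List.pyGet?_zero_cons, Option.getD_some, hk]
    · have hne : (ca.getD p.1 0 == 1 && PySem.Set.len p.2 == 1) = false := by
        have h4 : (ca.getD p.1 0 == 1) = false := by simp only [beq_eq_false_iff_ne, ne_eq]; omega
        rw [h4, Bool.false_and]
      have hcb : (!db.contains q.1) = false := by rw [← hk]; rw [h2]; rfl
      simp only [List.filter_cons]
      rw [hne, hcb, if_neg Bool.false_ne_true, if_neg Bool.false_ne_true]
      exact ih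

theorem pvInv_out (a : PySem.Dict String Int × PySem.Dict String (PySem.Set String))
    (b : PySem.Dict String String × PySem.Set String) (h : pvInv a b) :
    (a.2.items.filter (fun p => a.1.getD p.1 0 == 1 && PySem.Set.len p.2 == 1)).map
      (fun p => (p.1, (PySem.List.pyGet? p.2 0).getD ""))
    = b.1.items.filter (fun p => !(b.2.contains p.1)) :=
  pvInv_out_aux a.1 b.2 a.2.items b.1.items h.1

theorem pv_foldA (genome_sequences : List (String × String)) (k : Int) :
    genome_sequences.foldl
      (fun (st : PySem.Dict String Int × PySem.Dict String (PySem.Set String)) g =>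
        (PySem.List.pyRange 0 (PySem.Str.len g.2 - k + 1) 1).foldl
          (fun st i =>
            let kmer := PySem.Str.slice g.2 (some i) (some (i + k))
            (st.1.modify kmer 0 (· + 1), st.2.modify kmer PySem.Set.empty (fun s => s.add g.1)))
          st)
      (PySem.Dict.empty, PySem.Dict.empty)
    = (pvEvents genome_sequences k).foldl pvStepA (PySem.Dict.empty, PySem.Dict.empty) := by
  rw [pvEvents, List.foldl_flatMap]
  simp only [List.foldl_map, pvStepA]

-- ---- the first-occurrence list and its fold characterisation ----

def pvFPStep (acc : List (String × String)) (e : String × String) : List (String × String) :=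
  if acc.any (fun p => p.1 == e.1) then acc else acc ++ [e]

def pvFP (P : List (String × String)) : List (String × String) := P.foldl pvFPStep []

theorem pvO_items (P : List (String × String)) :
    ∀ (s : PySem.Dict String String) (d : PySem.Set String),
      (P.foldl pvStepO (s, d)).1.items = P.foldl pvFPStep s.items := by
  induction P with
  | nil => intro s d; rfl
  | cons e t ih =>
    intro s d
    simp only [List.foldl_cons]
    by_cases hc : s.contains e.1 = true
    · have hany : s.items.any (fun p => p.1 == e.1) = true := by
        unfold PySem.Dict.contains at hc; exact hc
      have h1 : pvStepO (s, d) e = (s, d.add e.1) := pvStepO_pos _ _ hc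
      have h2 : pvFPStep s.items e = s.items := by
        unfold pvFPStep; rw [hany, if_pos rfl]
      rw [h1, h2, ih]
    · have hc' : s.contains e.1 = false := by
        cases hx : s.contains e.1
        · rfl
        · exact absurd hx hc
      have hany : s.items.any (fun p => p.1 == e.1) = false := by
        unfold PySem.Dict.contains at hc'; exact hc'
      have h1 : pvStepO (s, d) e = (s.insert e.1 e.2, d) := pvStepO_neg _ _ hc'
      have h2 : pvFPStep s.items e = s.items ++ [e] := by
        unfold pvFPStep; rw [hany]; simp
      rw [h1, h2, ih, PySem.Dict.items_insert_of_not_contains _ _ hc']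

theorem pvFP_any (P : List (String × String)) :
    ∀ (acc : List (String × String)) (x : String),
      (P.foldl pvFPStep acc).any (fun p => p.1 == x)
        = (acc.any (fun p => p.1 == x) || decide (x ∈ P.map Prod.fst)) := by
  induction P with
  | nil => intro acc x; simp
  | cons e t ih =>
    intro acc x
    simp only [List.foldl_cons, List.map_cons, List.mem_cons]
    rw [ih]
    have hstep : (pvFPStep acc e).any (fun p => p.1 == x)
        = (acc.any (fun p => p.1 == x) || decide (x = e.1)) := by
      unfold pvFPStep
      by_cases hc : acc.any (fun p => p.1 == e.1) = true
      · rw [if_pos hc]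
        by_cases hx : x = e.1
        · subst hx; rw [hc]; simp
        · simp [hx]
      · rw [if_neg hc]
        have hbe : (e.1 == x) = decide (x = e.1) := by
          by_cases hx : x = e.1
          · simp [hx]
          · simp only [hx, decide_false]
            exact beq_eq_false_iff_ne.mpr (fun h => hx h.symm)
        simp [List.any_append, hbe]
    rw [hstep]
    by_cases hx : x = e.1 <;> simp [hx]

theorem pvFP_mem (P : List (String × String)) :
    ∀ (acc : List (String × String)) (e : String × String),
      e ∈ P.foldl pvFPStep acc → e ∈ acc ∨ e ∈ P := by
  induction P with
  | nil => intro acc e h; exact Or.inl h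
  | cons x t ih =>
    intro acc e h
    rcases ih _ e h with h' | h'
    · unfold pvFPStep at h'
      split_ifs at h' with hc
      · exact Or.inl h'
      · rcases List.mem_append.mp h' with h'' | h''
        · exact Or.inl h''
        · exact Or.inr (by simp at h''; simp [h''])
    · exact Or.inr (List.mem_cons_of_mem _ h')

-- the duplicate set of the intermediate fold holds exactly the k-mers with count ≥ 2
theorem pvO_dup (E : List (String × String)) (km : String) :
    ((E.foldl pvStepO (PySem.Dict.empty, PySem.Set.empty)).2).contains km
      = decide (2 ≤ (E.map Prod.fst).count km) := by
  induction E using List.reverseRecOn with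
  | nil => simp [PySem.Set.contains]
  | append_singleton P e ih =>
    rw [List.foldl_append, List.foldl_cons, List.foldl_nil]
    have hkeys : (P.foldl pvStepO (PySem.Dict.empty, PySem.Set.empty)).1.contains e.1
        = decide (e.1 ∈ P.map Prod.fst) := by
      unfold PySem.Dict.contains
      rw [pvO_items]
      have := pvFP_any P PySem.Dict.empty.items e.1
      rw [this]
      simp [PySem.Dict.empty]
    by_cases hm : e.1 ∈ P.map Prod.fst
    · rw [pvStepO_pos _ _ (by rw [hkeys]; simp [hm])]
      dsimp only
      rw [pv_contains_add, ih]
      have hcnt : 1 ≤ (P.map Prod.fst).count e.1 := List.one_le_count_iff.mpr hm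
      by_cases hx : km = e.1
      · subst hx
        have h1 : List.count e.1 (List.map Prod.fst [e]) = 1 := by simp
        rw [List.map_append, List.count_append, h1]
        simp only [BEq.rfl, Bool.or_true]
        symm
        simp only [decide_eq_true_eq]
        omega
      · have hb : (km == e.1) = false := by simp [hx]
        have h0 : List.count km (List.map Prod.fst [e]) = 0 :=
          List.count_eq_zero.mpr (by simp [hx])
        have hc1 : List.count km (List.map Prod.fst (P ++ [e]))
            = List.count km (List.map Prod.fst P) := by
          rw [List.map_append, List.count_append, h0]
          omega
        rw [hc1, hb, Bool.or_false]
    · rw [pvStepO_neg _ _ (by rw [hkeys]; simp [hm])]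
      dsimp only
      rw [ih]
      by_cases hx : km = e.1
      · subst hx
        have hcnt : (P.map Prod.fst).count e.1 = 0 := List.count_eq_zero.mpr hm
        have h1 : List.count e.1 (List.map Prod.fst [e]) = 1 := by simp
        rw [List.map_append, List.count_append, h1, hcnt]
        simp
      · have h0 : List.count km (List.map Prod.fst [e]) = 0 :=
          List.count_eq_zero.mpr (by simp [hx])
        have hc1 : List.count km (List.map Prod.fst (P ++ [e]))
            = List.count km (List.map Prod.fst P) := by
          rw [List.map_append, List.count_append, h0]
          omega
        rw [hc1]

-- filtering first occurrences by a predicate that only holds for count-≤-1 k-mers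
-- equals filtering the raw event list
theorem pvF (P : List (String × String)) (q : String → Bool)
    (hq : ∀ km, q km = true → (P.map Prod.fst).count km ≤ 1) :
    (pvFP P).filter (fun e => q e.1) = P.filter (fun e => q e.1) := by
  induction P using List.reverseRecOn with
  | nil => rfl
  | append_singleton P e ih =>
    have hq' : ∀ km, q km = true → (P.map Prod.fst).count km ≤ 1 := by
      intro km h
      have := hq km h
      simp only [List.map_append, List.count_append] at this
      omega
    have hFP : pvFP (P ++ [e]) = pvFPStep (pvFP P) e := by
      unfold pvFP
      rw [List.foldl_append, List.foldl_cons, List.foldl_nil]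
    have hany : (pvFP P).any (fun p => p.1 == e.1) = decide (e.1 ∈ P.map Prod.fst) := by
      unfold pvFP
      rw [pvFP_any P [] e.1]
      simp
    rw [hFP]
    unfold pvFPStep
    rw [hany, List.filter_append]
    by_cases hqe : q e.1 = true
    · have hc := hq e.1 hqe
      have h1 : List.count e.1 (List.map Prod.fst [e]) = 1 := by simp
      rw [List.map_append, List.count_append, h1] at hc
      have hc0 : (P.map Prod.fst).count e.1 = 0 := by omega
      have hnm : e.1 ∉ P.map Prod.fst := List.count_eq_zero.mp hc0
      rw [if_neg (by simp [hnm]), List.filter_append, ih hq']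
    · have hqe' : q e.1 = false := by
        cases hx : q e.1
        · rfl
        · exact absurd hx hqe
      have hlast : ([e] : List (String × String)).filter (fun e => q e.1) = [] := by
        simp [hqe']
      rw [hlast, List.append_nil]
      by_cases hin : e.1 ∈ P.map Prod.fst
      · rw [if_pos (by simp [hin]), ih hq']
      · rw [if_neg (by simp [hin]), List.filter_append, hlast, List.append_nil, ih hq']

-- ---- the sorted run scan marks exactly the count-1 k-mers ----

theorem pvScan_aux (rest : List String) :
    ∀ (u : PySem.Set String) (l : String) (c : String → Nat),
      rest.Pairwise (· ≤ ·) → (∀ y ∈ rest, l ≤ y) → 1 ≤ c l →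
      (∀ y, y ∈ rest → y ≠ l → c y = 0) →
      (∀ x, u.contains x = decide (c x = 1 ∧ x ≠ l)) →
      ∀ x, (pvFlush (rest.foldl pvScanStep (u, some l, (c l : Int)))).contains x
          = decide (c x + rest.count x = 1) := by
  induction rest with
  | nil =>
    intro u l c _ _ hcl _ hu x
    simp only [List.foldl_nil, List.count_nil, Nat.add_zero]
    by_cases h1 : c l = 1
    · have hb : (((c l : Nat) : Int) == 1) = true := by simp [h1]
      have hfl : pvFlush (u, some l, ((c l : Nat) : Int)) = PySem.Set.add u l := by
        unfold pvFlush
        rw [if_pos hb]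
      rw [hfl, pv_contains_add, hu]
      by_cases hx : x = l
      · subst hx
        simp [h1]
      · have hbx : (x == l) = false := beq_eq_false_iff_ne.mpr hx
        simp [hbx, hx]
    · have hb : (((c l : Nat) : Int) == 1) = false := by simp; omega
      have hfl : pvFlush (u, some l, ((c l : Nat) : Int)) = u := by
        unfold pvFlush
        rw [hb]
        simp
      rw [hfl, hu]
      by_cases hx : x = l
      · subst hx
        simp
        omega
      · simp [hx]
  | cons km rest ih =>
    intro u l c hpw hge hcl hzero hu x
    obtain ⟨hhead, htail⟩ := List.pairwise_cons.mp hpw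
    rw [List.foldl_cons]
    by_cases hkm : km = l
    · -- same run continues
      subst hkm
      have hstep : pvScanStep (u, some km, ((c km : Nat) : Int)) km
          = (u, some km, ((c km : Nat) : Int) + 1) := by
        unfold pvScanStep
        rw [if_pos (by simp)]
      rw [hstep]
      have hres := ih u km (fun y => if y = km then c y + 1 else c y) htail hhead
        (by have hb : (fun y => if y = km then c y + 1 else c y) km = c km + 1 := by simp
            rw [hb]
            omega)
        (by intro y hy hne
            simp only [if_neg hne]
            exact hzero y (List.mem_cons_of_mem _ hy) hne)
        (by intro z
            rw [hu]
            by_cases hz : z = km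
            · subst hz
              simp
            · simp [hz])
        x
      have hb : (if km = km then c km + 1 else c km) = c km + 1 := if_pos rfl
      rw [hb] at hres
      push_cast at hres
      have harith : (if x = km then c x + 1 else c x) + List.count x rest
          = c x + List.count x (km :: rest) := by
        rw [List.count_cons]
        by_cases hx : x = km
        · subst hx
          simp only [BEq.rfl, if_true]
          omega
        · have hbx : (km == x) = false := beq_eq_false_iff_ne.mpr (fun h => hx h.symm)
          simp only [if_neg hx, hbx, Bool.false_eq_true, if_false]
          omega
      rw [harith] at hres
      exact hres
    · -- a new, strictly larger k-mer starts its run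
      have hlt : l < km := lt_of_le_of_ne (hge km List.mem_cons_self) (fun h => hkm h.symm)
      have hckm : c km = 0 := hzero km List.mem_cons_self hkm
      have hstep : pvScanStep (u, some l, ((c l : Nat) : Int)) km
          = ((if (((c l : Nat) : Int) == 1) = true then PySem.Set.add u l else u), some km, 1) := by
        unfold pvScanStep
        rw [if_neg (by simp; intro h; exact hkm h.symm)]
      rw [hstep]
      have hres := ih (if (((c l : Nat) : Int) == 1) = true then PySem.Set.add u l else u) km
        (fun y => if y = km then 1 else c y) htail hhead
        (by simp)
        (by intro y hy hne
            simp only [if_neg hne]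
            by_cases hyl : y = l
            · exfalso
              subst hyl
              exact absurd (lt_of_lt_of_le hlt (hhead y hy)) (lt_irrefl y)
            · exact hzero y (List.mem_cons_of_mem _ hy) hyl)
        (by intro z
            by_cases h1 : c l = 1
            · rw [if_pos (by simp [h1]), pv_contains_add, hu]
              by_cases hz : z = l
              · subst hz
                have hzk : z ≠ km := fun h => hkm h.symm
                simp [h1, hzk]
              · have hb : (z == l) = false := beq_eq_false_iff_ne.mpr hz
                by_cases hz2 : z = km
                · subst hz2
                  simp [hb, hckm]
                · simp [hb, hz, hz2]
            · rw [if_neg (by simp; omega), hu]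
              by_cases hz : z = l
              · subst hz
                have hzk : z ≠ km := fun h => hkm h.symm
                simp [hzk, h1]
              · by_cases hz2 : z = km
                · subst hz2
                  simp [hckm, hz]
                · simp [hz, hz2])
        x
      have hb : (if km = km then 1 else c km) = 1 := if_pos rfl
      rw [hb] at hres
      push_cast at hres
      have harith : (if x = km then 1 else c x) + List.count x rest
          = c x + List.count x (km :: rest) := by
        rw [List.count_cons]
        by_cases hx : x = km
        · subst hx
          simp only [BEq.rfl, if_true]
          omega
        · have hbx : (km == x) = false := beq_eq_false_iff_ne.mpr (fun h => hx h.symm)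
          simp only [if_neg hx, hbx, Bool.false_eq_true, if_false]
          omega
      rw [harith] at hres
      exact hres

theorem pvScan_main (S : List String) (hpw : S.Pairwise (· ≤ ·)) (x : String) :
    (pvFlush (S.foldl pvScanStep (PySem.Set.empty, none, 0))).contains x
      = decide (S.count x = 1) := by
  cases S with
  | nil => simp [pvFlush, PySem.Set.contains, PySem.Set.empty]
  | cons km rest =>
    obtain ⟨hhead, htail⟩ := List.pairwise_cons.mp hpw
    rw [List.foldl_cons]
    have hstep : pvScanStep (PySem.Set.empty, none, 0) km
        = (PySem.Set.empty, some km, 1) := by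
      unfold pvScanStep
      rw [if_neg (by simp)]
      simp
    rw [hstep]
    have hres := pvScan_aux rest PySem.Set.empty km (fun y => if y = km then 1 else 0)
      htail hhead (by simp)
      (by intro y _ hne; simp [hne])
      (by intro z
          by_cases hz : z = km
          · subst hz
            simp [PySem.Set.contains, PySem.Set.empty]
          · simp [PySem.Set.contains, PySem.Set.empty, hz])
      x
    have hb : ((if km = km then 1 else 0) : Nat) = 1 := if_pos rfl
    rw [hb] at hres
    push_cast at hres
    have harith : ((if x = km then 1 else 0) : Nat) + List.count x rest
        = List.count x (km :: rest) := by
      rw [List.count_cons]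
      by_cases hx : x = km
      · subst hx
        simp only [BEq.rfl, if_true]
        omega
      · have hbx : (km == x) = false := beq_eq_false_iff_ne.mpr (fun h => hx h.symm)
        simp only [if_neg hx, hbx, Bool.false_eq_true, if_false]
        omega
    rw [harith] at hres
    exact hres

-- ===== VERDICT (by name: the statement is the Claim_ definition above) =====
theorem find_hammers_spec : Claim_equal_find_hammers := by
  intro gs k _
  unfold Spec_find_hammers find_hammers find_hammers_alt
  rw [pv_foldA]
  set E := pvEvents gs k with hE
  set st := E.foldl pvStepO (PySem.Dict.empty, PySem.Set.empty) with hst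
  have hA := pvInv_out _ _ (pvInv_fold E _ _ pvInv_init)
  rw [← hst] at hA
  dsimp only
  rw [hA]
  -- both sides reduce to filtering E by 'global k-mer count = 1'
  have hitems : st.1.items = pvFP E := by
    rw [hst, pvO_items]; rfl
  rw [hitems]
  have hleft : (pvFP E).filter (fun p => !(st.2.contains p.1))
      = (pvFP E).filter (fun e => decide ((E.map Prod.fst).count e.1 = 1)) := by
    apply List.filter_congr
    intro e he
    have hmemE : e ∈ E := by
      rcases pvFP_mem E [] e he with h | h
      · exact absurd h (List.not_mem_nil)
      · exact h
    have hcnt : 1 ≤ (E.map Prod.fst).count e.1 :=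
      List.one_le_count_iff.mpr (List.mem_map_of_mem hmemE)
    rw [hst, pvO_dup]
    by_cases h1 : (E.map Prod.fst).count e.1 = 1
    · simp [h1]
    · simp [h1]; omega
  rw [hleft, pvF E (fun km => decide (List.count km (List.map Prod.fst E) = 1))
    (by intro km h
        simp only [decide_eq_true_eq] at h
        omega)]
  -- right side
  symm
  apply List.filter_congr
  intro e _
  have hpw : ((E.map Prod.fst).mergeSort (fun a b => a ≤ b)).Pairwise (· ≤ ·) := by
    have h := List.pairwise_mergeSort (le := fun (a b : String) => decide (a ≤ b))
      (by intro a b c hab hbc; simp at *; exact le_trans hab hbc)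
      (by intro a b; rcases le_total a b with h | h <;> simp [h]) (E.map Prod.fst)
    exact h.imp (by intro a b hb; simpa using hb)
  rw [pvScan_main _ hpw e.1]
  have hperm : ((E.map Prod.fst).mergeSort (fun a b => a ≤ b)).Perm (E.map Prod.fst) :=
    List.mergeSort_perm _ _
  rw [hperm.count_eq]
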